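-- pv_equiv track=rewrite | github.com/jpw-97/gitfish-cli | gitfish/github_sync.py | score_events
-- ===== SOURCE A (Python) =====
-- SCORES = {
--     "PushEvent": {"xp": 1, "coins": 1},
--     "PullRequestEvent": {"xp": 5, "coins": 4},
--     "PullRequestReviewEvent": {"xp": 3, "coins": 2},
--     "IssuesEvent": {"xp": 2, "coins": 1},
--     "CreateEvent": {"xp": 5, "coins": 3}
-- }
--
-- def score_events(events):
--     xp = 0
--     coins = 0
--     for e in events:
--         t = e.get("type")
--         score = SCORES.get(t)
--         if score:
--             xp += score["xp"]
--             coins += score["coins"]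
--     return xp, coins
-- ===== SOURCE B (Python) =====
-- SCORES = {
--     "PushEvent": {"xp": 1, "coins": 1},
--     "PullRequestEvent": {"xp": 5, "coins": 4},
--     "PullRequestReviewEvent": {"xp": 3, "coins": 2},
--     "IssuesEvent": {"xp": 2, "coins": 1},
--     "CreateEvent": {"xp": 5, "coins": 3}
-- }
--
-- def score_events(events):
--     counts = {}
--     for e in events:
--         t = e.get("type")
--         counts[t] = counts.get(t, 0) + 1
--     xp = sum(counts.get(t, 0) * s["xp"] for t, s in SCORES.items())
--     coins = sum(counts.get(t, 0) * s["coins"] for t, s in SCORES.items())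
--     return xp, coins
-- ===== Notes on version B (the rewrite author's own statement) =====
-- stated objective: alternative
-- what changed: B inverts the traversal: it tallies event types into a frequency dict in one pass, then computes xp and coins by weighting each SCORES entry by its count, instead of accumulating both totals per event inside the loop.
import Mathlib
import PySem

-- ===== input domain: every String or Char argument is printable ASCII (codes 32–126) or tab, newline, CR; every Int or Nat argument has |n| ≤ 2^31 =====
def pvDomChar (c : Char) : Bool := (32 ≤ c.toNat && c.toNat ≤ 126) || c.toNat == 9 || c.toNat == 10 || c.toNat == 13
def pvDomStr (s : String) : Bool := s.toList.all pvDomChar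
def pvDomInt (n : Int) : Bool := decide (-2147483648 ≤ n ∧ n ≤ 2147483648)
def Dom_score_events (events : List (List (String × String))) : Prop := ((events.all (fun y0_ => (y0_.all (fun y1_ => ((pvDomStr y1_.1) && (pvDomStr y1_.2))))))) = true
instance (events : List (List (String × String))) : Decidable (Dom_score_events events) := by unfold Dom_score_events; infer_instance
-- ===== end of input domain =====

-- B replaces A's per-event accumulation by a two-pass count-then-weight: tally event
-- types into a dict, then sum count * score over the SCORES table (objective: alternative).

-- ===== PORT A =====
def SCORES : PySem.Dict String (Int × Int) :=
  PySem.Dict.ofList [("PushEvent", (1, 1)), ("PullRequestEvent", (5, 4)),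
    ("PullRequestReviewEvent", (3, 2)), ("IssuesEvent", (2, 1)), ("CreateEvent", (5, 3))]

def score_events (events : List (List (String × String))) : Int × Int :=
  events.foldl (fun st e =>
    let t : Option String := PySem.Dict.get? (PySem.Dict.mk e) "type"
    let score : Option (Int × Int) :=
      match t with
      | some s => PySem.Dict.get? SCORES s
      | none => none
    match score with
    | some sc => (st.1 + sc.1, st.2 + sc.2)
    | none => st) (0, 0)

-- ===== PORT B =====
def score_events_alt (events : List (List (String × String))) : Int × Int :=
  let counts : PySem.Dict (Option String) Int :=
    events.foldl (fun d e =>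
      let t : Option String := PySem.Dict.get? (PySem.Dict.mk e) "type"
      d.insert t (d.getD t 0 + 1)) PySem.Dict.empty
  let xp := SCORES.items.foldl (fun acc ts => acc + counts.getD (some ts.1) 0 * ts.2.1) 0
  let coins := SCORES.items.foldl (fun acc ts => acc + counts.getD (some ts.1) 0 * ts.2.2) 0
  (xp, coins)

-- ===== PRECONDITION & SPEC =====
def Spec_score_events (events : List (List (String × String))) (out : Int × Int) : Prop := out = score_events_alt events
instance (events : List (List (String × String))) (out : Int × Int) : Decidable (Spec_score_events events out) := by unfold Spec_score_events; infer_instance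

-- ===== CLAIM (what is proved, stated in full; the proofs are below) =====
def Claim_equal_score_events : Prop := ∀ (events : List (List (String × String))), Dom_score_events events → Spec_score_events events (score_events events)

-- ===== LEMMAS AND PROOFS =====

-- the type of one event, as both programs extract it
def pvType (e : List (String × String)) : Option String := PySem.Dict.get? (PySem.Dict.mk e) "type"

-- xp/coin weight A adds for one event type
def pvW1 (t : Option String) : Int :=
  match t with
  | some s => match PySem.Dict.get? SCORES s with | some sc => sc.1 | none => 0
  | none => 0

def pvW2 (t : Option String) : Int :=
  match t with
  | some s => match PySem.Dict.get? SCORES s with | some sc => sc.2 | none => 0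
  | none => 0

-- B's totals as a function of the list of types
def pvF1 (ts : List (Option String)) : Int :=
  SCORES.items.foldl (fun acc p => acc + ((ts.count (some p.1) : Int)) * p.2.1) 0

def pvF2 (ts : List (Option String)) : Int :=
  SCORES.items.foldl (fun acc p => acc + ((ts.count (some p.1) : Int)) * p.2.2) 0

theorem SCORES_items : SCORES.items = [("PushEvent", ((1:Int), (1:Int))), ("PullRequestEvent", (5, 4)),
    ("PullRequestReviewEvent", (3, 2)), ("IssuesEvent", (2, 1)), ("CreateEvent", (5, 3))] := by rfl

theorem pvF1_cons (t : Option String) (ts : List (Option String)) :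
    pvF1 (t :: ts) = pvW1 t + pvF1 ts := by
  rcases t with _ | s
  · simp [pvF1, pvW1, SCORES_items]
  · by_cases h1 : s = "PushEvent"
    · subst h1; simp [pvF1, pvW1, SCORES_items, PySem.Dict.get?, List.count_cons]; ring
    · by_cases h2 : s = "PullRequestEvent"
      · subst h2; simp [pvF1, pvW1, SCORES_items, PySem.Dict.get?, List.count_cons]; ring
      · by_cases h3 : s = "PullRequestReviewEvent"
        · subst h3; simp [pvF1, pvW1, SCORES_items, PySem.Dict.get?, List.count_cons]; ring
        · by_cases h4 : s = "IssuesEvent"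
          · subst h4; simp [pvF1, pvW1, SCORES_items, PySem.Dict.get?, List.count_cons]; ring
          · by_cases h5 : s = "CreateEvent"
            · subst h5; simp [pvF1, pvW1, SCORES_items, PySem.Dict.get?, List.count_cons]; ring
            · simp_all [pvF1, pvW1, SCORES_items, PySem.Dict.get?, List.count_cons,
                Ne.symm h1, Ne.symm h2, Ne.symm h3, Ne.symm h4, Ne.symm h5]

theorem pvF2_cons (t : Option String) (ts : List (Option String)) :
    pvF2 (t :: ts) = pvW2 t + pvF2 ts := by
  rcases t with _ | s
  · simp [pvF2, pvW2, SCORES_items]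
  · by_cases h1 : s = "PushEvent"
    · subst h1; simp [pvF2, pvW2, SCORES_items, PySem.Dict.get?, List.count_cons]; ring
    · by_cases h2 : s = "PullRequestEvent"
      · subst h2; simp [pvF2, pvW2, SCORES_items, PySem.Dict.get?, List.count_cons]; ring
      · by_cases h3 : s = "PullRequestReviewEvent"
        · subst h3; simp [pvF2, pvW2, SCORES_items, PySem.Dict.get?, List.count_cons]; ring
        · by_cases h4 : s = "IssuesEvent"
          · subst h4; simp [pvF2, pvW2, SCORES_items, PySem.Dict.get?, List.count_cons]; ring
          · by_cases h5 : s = "CreateEvent"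
            · subst h5; simp [pvF2, pvW2, SCORES_items, PySem.Dict.get?, List.count_cons]; ring
            · simp_all [pvF2, pvW2, SCORES_items, PySem.Dict.get?, List.count_cons,
                Ne.symm h1, Ne.symm h2, Ne.symm h3, Ne.symm h4, Ne.symm h5]

theorem pvA_foldl (events : List (List (String × String))) (x c : Int) :
    events.foldl (fun st e =>
      let t : Option String := PySem.Dict.get? (PySem.Dict.mk e) "type"
      let score : Option (Int × Int) :=
        match t with
        | some s => PySem.Dict.get? SCORES s
        | none => none
      match score with
      | some sc => (st.1 + sc.1, st.2 + sc.2)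
      | none => st) (x, c)
    = (x + pvF1 (events.map pvType), c + pvF2 (events.map pvType)) := by
  induction events generalizing x c with
  | nil => simp [pvF1, pvF2, SCORES_items]
  | cons e es ih =>
    simp only [List.foldl_cons, List.map_cons, pvF1_cons, pvF2_cons]
    rcases h : pvType e with _ | s
    · simp only [pvType] at h
      simp only [h, ih, pvW1, pvW2, Prod.mk.injEq]
      constructor <;> ring
    · simp only [pvType] at h
      rcases hs : PySem.Dict.get? SCORES s with _ | sc
      · simp only [h, hs, ih, pvW1, pvW2, Prod.mk.injEq]
        constructor <;> ring
      · simp only [h, hs, ih, pvW1, pvW2, Prod.mk.injEq]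
        constructor <;> ring

theorem pvAlt_counts (events : List (List (String × String))) :
    score_events_alt events = (pvF1 (events.map pvType), pvF2 (events.map pvType)) := by
  have hc : (events.foldl (fun d e =>
      let t : Option String := PySem.Dict.get? (PySem.Dict.mk e) "type"
      d.insert t (d.getD t 0 + 1)) PySem.Dict.empty)
      = PySem.Dict.counter (events.map pvType) := by
    rw [← PySem.Dict.foldl_insert_getD_add_one_eq_counter, List.foldl_map]
    rfl
  simp only [score_events_alt, hc, pvF1, pvF2, PySem.Dict.getD_counter]

-- ===== VERDICT (by name: the statement is the Claim_ definition above) =====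
theorem score_events_spec : Claim_equal_score_events := by
  intro events _
  show score_events events = score_events_alt events
  rw [score_events, pvA_foldl, pvAlt_counts]
  simp
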